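-- pv_equiv track=rewrite | github.com/alexandraback/datacollection | solutions_5644738749267968_0/Python/Chonchon/deceitfulWar.py | ken_choise
-- ===== SOURCE A (Python) =====
-- def ken_choise(ken_masses, naomi_choise):
--     ken_bigger = [ken_masses[j] for j in range(0, len(ken_masses)) if ken_masses[j] > naomi_choise]
--     ken_bigger.sort()
--     if len(ken_bigger) == 0:
--         ken_choise = ken_masses.pop(0)
--     else:
--         ken_choise = ken_masses.pop(ken_masses.index(ken_bigger[0]))
--     return ken_choise
-- ===== SOURCE B (Python) =====
-- def ken_choise(ken_masses, naomi_choise):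
--     # Single linear pass: track the smallest mass exceeding naomi's choice
--     # (first occurrence wins ties); fall back to the first element.
--     # Note: unlike A, this does not mutate ken_masses; return value is identical.
--     best = None
--     for m in ken_masses:
--         if m > naomi_choise and (best is None or m < best):
--             best = m
--     return best if best is not None else ken_masses[0]
-- ===== Notes on version B (the rewrite author's own statement) =====
-- stated objective: faster
-- what changed: Replaced the filter-then-sort-then-index-then-pop pipeline by a single linear pass that tracks the minimum qualifying mass; B does not mutate the input list (return value is identical).
import Mathlib
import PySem

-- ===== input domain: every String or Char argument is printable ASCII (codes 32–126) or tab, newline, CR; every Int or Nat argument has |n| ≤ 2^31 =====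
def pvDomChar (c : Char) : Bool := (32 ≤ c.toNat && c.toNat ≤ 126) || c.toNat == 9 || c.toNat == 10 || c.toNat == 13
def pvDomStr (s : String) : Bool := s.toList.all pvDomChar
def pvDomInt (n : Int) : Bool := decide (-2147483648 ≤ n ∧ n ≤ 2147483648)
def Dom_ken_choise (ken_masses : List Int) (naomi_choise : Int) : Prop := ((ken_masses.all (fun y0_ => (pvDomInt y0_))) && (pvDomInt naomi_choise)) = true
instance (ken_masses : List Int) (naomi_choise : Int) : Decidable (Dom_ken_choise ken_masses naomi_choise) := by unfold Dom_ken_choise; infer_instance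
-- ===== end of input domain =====

-- B replaces A's filter/sort/index/pop pipeline with one linear min-tracking pass (faster per the
-- timing run's measurement); equivalence is about the RETURN value only (A pops from ken_masses,
-- B does not mutate it).

-- ===== PORT A =====
def ken_choise (ken_masses : List Int) (naomi_choise : Int) : Int :=
  -- ken_bigger = [ken_masses[j] for j in range(len(ken_masses)) if ken_masses[j] > naomi_choise]; ken_bigger.sort()
  let ken_bigger := PySem.List.sorted (ken_masses.filter (fun x => decide (naomi_choise < x))) (fun x => x) false
  if ken_bigger.length = 0 then
    match PySem.List.pop? ken_masses 0 with        -- ken_masses.pop(0); raises IndexError on []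
    | some r => r.1
    | none => 0
  else
    match PySem.List.index? ken_masses (PySem.List.pyGetD ken_bigger 0 0) with  -- ken_masses.index(ken_bigger[0])
    | some i =>
      match PySem.List.pop? ken_masses (i : Int) with
      | some r => r.1
      | none => 0
    | none => 0

-- ===== PORT B =====
-- B's loop body: 'if m > naomi_choise and (best is None or m < best): best = m'
def kcStep (n : Int) (b : Option Int) (m : Int) : Option Int :=
  if n < m && (match b with | none => true | some v => decide (m < v)) then some m else b

def ken_choise_alt (ken_masses : List Int) (naomi_choise : Int) : Int :=
  let best := ken_masses.foldl (kcStep naomi_choise) none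
  match best with
  | some v => v
  | none =>
    match PySem.List.pyGet? ken_masses 0 with      -- ken_masses[0]; raises IndexError on []
    | some v => v
    | none => 0

-- ===== PRECONDITION & SPEC =====
-- A raises IndexError (pop from empty list) exactly when ken_masses is empty.
def Pre_ken_choise (ken_masses : List Int) (naomi_choise : Int) : Prop := ken_masses ≠ []
instance (ken_masses : List Int) (naomi_choise : Int) : Decidable (Pre_ken_choise ken_masses naomi_choise) := by unfold Pre_ken_choise; infer_instance
def pvWitness_ken_choise : List Int × Int := ([3, 7, 2, 7], 4)

def Spec_ken_choise (ken_masses : List Int) (naomi_choise : Int) (out : Int) : Prop := out = ken_choise_alt ken_masses naomi_choise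
instance (ken_masses : List Int) (naomi_choise : Int) (out : Int) : Decidable (Spec_ken_choise ken_masses naomi_choise out) := by unfold Spec_ken_choise; infer_instance

-- ===== CLAIM (what is proved, stated in full; the proofs are below) =====
def Claim_equal_ken_choise : Prop := ∀ (ken_masses : List Int) (naomi_choise : Int), Dom_ken_choise ken_masses naomi_choise → Pre_ken_choise ken_masses naomi_choise → Spec_ken_choise ken_masses naomi_choise (ken_choise ken_masses naomi_choise)

-- ===== LEMMAS AND PROOFS =====

theorem kcStep_eq (n : Int) (b : Option Int) (m : Int) :
    kcStep n b m = if decide (n < m) then (match b with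
      | none => some m
      | some v => some (min v m)) else b := by
  cases b with
  | none => simp [kcStep]
  | some v =>
      by_cases h1 : n < m
      · by_cases h2 : m < v
        · simp [kcStep, h1, h2, min_eq_right (le_of_lt h2)]
        · have hvm : v ≤ m := by omega
          simp [kcStep, h1, h2, min_eq_left hvm]
      · simp [kcStep, h1]

-- folding kcStep over the whole list = folding the "min" step over the qualifying elements
theorem kcFold_filter (n : Int) (xs : List Int) (b : Option Int) :
    xs.foldl (kcStep n) b
      = (xs.filter (fun x => decide (n < x))).foldl
          (fun (b : Option Int) m => match b with
            | none => some m
            | some v => some (min v m)) b := by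
  induction xs generalizing b with
  | nil => rfl
  | cons x t ih =>
      by_cases h : n < x
      · simp [List.foldl_cons, h, kcStep_eq, ih]
      · simp [List.foldl_cons, h, kcStep_eq, ih]

theorem kcFold_min (t : List Int) (v : Int) :
    t.foldl (fun (b : Option Int) m => match b with
            | none => some m
            | some v => some (min v m)) (some v) = some (t.foldl min v) := by
  induction t generalizing v with
  | nil => rfl
  | cons x t ih => simp [List.foldl_cons, ih]

-- B's fold computes min? of the qualifying sublist
theorem kcFold_eq_min? (n : Int) (xs : List Int) :
    xs.foldl (kcStep n) none
      = PySem.List.min? (xs.filter (fun x => decide (n < x))) (fun x => x) := by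
  rw [kcFold_filter]
  cases h : xs.filter (fun x => decide (n < x)) with
  | nil => rfl
  | cons y t => rw [PySem.List.min?_id_cons, List.foldl_cons, kcFold_min]

-- ===== VERDICT (by name: the statement is the Claim_ definition above) =====
theorem ken_choise_spec : Claim_equal_ken_choise := by
  intro km n _ hpre
  unfold Spec_ken_choise ken_choise ken_choise_alt
  show (let kb := PySem.List.sorted (km.filter (fun x => decide (n < x))) (fun x => x) false; _) = _
  rw [kcFold_eq_min? n km]
  set f := km.filter (fun x => decide (n < x)) with hf
  cases hs : PySem.List.sorted f (fun x => x) false with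
  | nil =>
      -- no qualifying element: both take the first element of km
      have hfe : f = [] := (PySem.List.sorted_eq_nil_iff f (fun x => x) false).mp hs
      rw [hfe]
      cases km with
      | nil => exact absurd rfl hpre
      | cons x t =>
          simp [PySem.List.pop?_zero_cons, PySem.List.min?, PySem.List.pyGet?,
            PySem.List.pyIdx?]
  | cons m t =>
      -- qualifying elements exist: A returns the head of the sorted list,
      -- B returns min? f; both are the minimum of f.
      have hm_mem_f : m ∈ f := by
        have : m ∈ PySem.List.sorted f (fun x => x) false := by
          rw [hs]; exact List.mem_cons_self
        exact (PySem.List.mem_sorted f (fun x => x) false m).mp this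
      have hm_min : ∀ y ∈ f, m ≤ y := PySem.List.key_head_sorted_le f (fun x => x) hs
      -- min? f = some m
      have hmin : PySem.List.min? f (fun x => x) = some m := by
        cases hq : PySem.List.min? f (fun x => x) with
        | none =>
            rw [PySem.List.min?_eq_none_iff] at hq
            rw [hq] at hm_mem_f
            simp at hm_mem_f
        | some q =>
            have hq_mem : q ∈ f := PySem.List.min?_mem hq
            have hq_min : ∀ y ∈ f, q ≤ y := PySem.List.min?_isMin hq
            have : q = m := le_antisymm (hq_min m hm_mem_f) (hm_min q hq_mem)
            rw [this]
      rw [hmin]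
      -- A side: index? km m = some i, pop gives km[i] = m
      have hm_mem_km : m ∈ km := List.mem_of_mem_filter hm_mem_f
      have hidx : ∃ i, PySem.List.index? km m = some i := by
        have := (PySem.List.index?_isSome_iff (xs := km) (v := m)).mpr hm_mem_km
        exact Option.isSome_iff_exists.mp this
      obtain ⟨i, hi⟩ := hidx
      obtain ⟨hk, hget, _⟩ := PySem.List.getElem_of_index?_eq_some hi
      have hpop : PySem.List.pop? km (i : Int) = some (km[i], km.eraseIdx i) :=
        PySem.List.pop?_natCast km i hk
      rw [PySem.List.index?_eq_idxOf?] at hi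
      simp [PySem.List.pyGetD, PySem.List.pyGet?, PySem.List.pyIdx?, hi, hpop, hget]
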